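-- pv_equiv track=rewrite | github.com/odoo/odoo | venv/Lib/site-packages/num2words/lang_ID.py | split_by_3
-- ===== SOURCE A (Python) =====
-- def split_by_3(number):
--     """
--     starting here, it groups the number by three from the tail
--     '1234567' -> (('1',),('234',),('567',))
--     :param number:str
--     :rtype:tuple
--     """
--     blocks = ()
--     length = len(number)
--
--     if length < 3:
--         blocks += ((number,),)
--     else:
--         len_of_first_block = length % 3
--
--         if len_of_first_block > 0:
--             first_block = number[0:len_of_first_block],
--             blocks += first_block,
--
--         for i in range(len_of_first_block, length, 3):
--             next_block = (number[i:i + 3],),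
--             blocks += next_block
--
--     return blocks
-- ===== SOURCE B (Python) =====
-- def split_by_3(number):
--     """
--     Group number into 3-char blocks from the tail, walking an index
--     backwards from the end instead of computing the first block's length.
--     """
--     if len(number) < 3:
--         return ((number,),)
--     blocks = ()
--     i = len(number)
--     while i > 0:
--         blocks = ((number[max(0, i - 3):i],),) + blocks
--         i = max(0, i - 3)
--     return blocks
-- ===== Notes on version B (the rewrite author's own statement) =====
-- stated objective: simpler
-- what changed: B replaces A's length%3 computation, first-block special case and forward range loop by a single backward while loop slicing 3-char blocks from the tail and prepending them, the leading partial block emerging as the final clamped slice.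
import Mathlib
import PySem

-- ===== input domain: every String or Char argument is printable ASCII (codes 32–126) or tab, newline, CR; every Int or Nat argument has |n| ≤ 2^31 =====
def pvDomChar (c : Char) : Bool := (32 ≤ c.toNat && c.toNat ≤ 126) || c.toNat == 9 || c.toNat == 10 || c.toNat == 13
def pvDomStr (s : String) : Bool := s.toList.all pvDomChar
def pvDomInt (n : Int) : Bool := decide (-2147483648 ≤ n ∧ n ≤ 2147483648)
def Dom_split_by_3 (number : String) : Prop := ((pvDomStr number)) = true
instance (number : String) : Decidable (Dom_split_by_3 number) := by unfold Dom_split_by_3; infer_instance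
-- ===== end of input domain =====

-- B is a simpler decomposition: one backward tail loop, no modulo and no first-block special case.

-- ===== PORT A =====
-- literal port of A: modulo-sized first block, then a forward range loop with step 3
def split_by_3 (number : String) : List (List String) :=
  let cs := number.toList
  let length : Int := cs.length
  if length < 3 then
    [[number]]
  else
    let len_of_first_block := PySem.Int.mod length 3
    let blocks : List (List String) :=
      if len_of_first_block > 0 then
        [[String.ofList (PySem.List.slice cs (some 0) (some len_of_first_block))]]
      else []
    (PySem.List.pyRange len_of_first_block length 3).foldl
      (fun acc i => acc ++ [[String.ofList (PySem.List.slice cs (some i) (some (i + 3)))]])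
      blocks

-- ===== PORT B =====
-- the while loop of Source B: i counts down from len(number) by 3 (clamped at 0), prepending blocks
def split_by_3_altLoop (cs : List Char) (i : Nat) : List (List String) :=
  if i = 0 then []
  else
    split_by_3_altLoop cs (i - 3) ++
      [[String.ofList (PySem.List.slice cs (some ((i - 3 : Nat) : Int)) (some (i : Int)))]]
  termination_by i
  decreasing_by omega

def split_by_3_alt (number : String) : List (List String) :=
  let cs := number.toList
  if cs.length < 3 then [[number]]
  else split_by_3_altLoop cs cs.length

-- ===== PRECONDITION & SPEC =====
def Spec_split_by_3 (number : String) (out : List (List String)) : Prop := out = split_by_3_alt number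
instance (number : String) (out : List (List String)) : Decidable (Spec_split_by_3 number out) := by unfold Spec_split_by_3; infer_instance

-- ===== CLAIM (what is proved, stated in full; the proofs are below) =====
def Claim_equal_split_by_3 : Prop := ∀ (number : String), Dom_split_by_3 number → Spec_split_by_3 number (split_by_3 number)

-- ===== LEMMAS AND PROOFS =====

-- characterisation of B's loop at i = r + 3*q, r < 3
theorem split_by_3_altLoop_eq (cs : List Char) (q r : Nat) (hr : r < 3) :
    split_by_3_altLoop cs (r + 3 * q) =
      (if r > 0 then [[String.ofList (PySem.List.slice cs (some 0) (some (r : Int)))]] else []) ++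
        (List.range q).map
          (fun (k : Nat) => [String.ofList (PySem.List.slice cs (some ((r : Int) + 3 * (k : Int)))
            (some ((r : Int) + 3 * (k : Int) + 3)))]) := by
  induction q with
  | zero =>
    interval_cases r <;> simp [split_by_3_altLoop]
  | succ q ih =>
    rw [show r + 3 * (q + 1) = (r + 3 * q) + 3 by ring]
    rw [split_by_3_altLoop]
    simp only [show (r + 3 * q) + 3 ≠ 0 by omega, ite_false]
    rw [show ((r + 3 * q) + 3) - 3 = r + 3 * q by omega, ih]
    rw [List.range_succ, List.map_append]
    simp only [List.map_cons, List.map_nil, List.append_assoc]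
    congr 6

theorem split_by_3_spec : Claim_equal_split_by_3 := by
  intro number _
  show split_by_3 number = split_by_3_alt number
  unfold split_by_3 split_by_3_alt
  simp only []
  by_cases h : ((number.toList.length : Int) < 3)
  · rw [if_pos h, if_pos (by exact_mod_cast h)]
  · rw [if_neg h, if_neg (show ¬ (number.toList.length < 3) by omega)]
    set cs := number.toList with hcs
    set n := cs.length with hn
    have hn3 : 3 ≤ n := by omega
    have hrw : n = n % 3 + 3 * (n / 3) := by omega
    rw [PySem.List.foldl_append_singleton_eq_map]
    rw [show split_by_3_altLoop cs n = split_by_3_altLoop cs (n % 3 + 3 * (n / 3)) by rw [← hrw]]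
    rw [split_by_3_altLoop_eq cs (n / 3) (n % 3) (by omega)]
    have hmod : PySem.Int.mod (n : Int) 3 = ((n % 3 : Nat) : Int) := by
      exact_mod_cast PySem.Int.mod_natCast n 3
    rw [hmod]
    rw [PySem.List.pyRange_of_pos _ _ (by norm_num : (0:Int) < 3)]
    rw [if_pos (show ((n % 3 : Nat) : Int) < (n : Int) by omega)]
    rw [show (((n : Int) - ((n % 3 : Nat) : Int) + 3 - 1) / 3).toNat = n / 3 from by omega]
    rw [List.map_map]
    congr 1
    split_ifs <;> first | rfl | (exfalso; omega)
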